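-- pv_equiv track=rewrite | github.com/lava-chen/duya | packages/agent/skills/websearch/news-investigator/scripts/timeline_builder.py | build_source_map
-- ===== SOURCE A (Python) =====
-- from collections import defaultdict
--
-- def build_source_map(events):
--     """Build a source relationship map showing what each source contributed."""
--     source_map = defaultdict(list)
--
--     for event in events:
--         source = event.get("source", "Unknown")
--         tier = event.get("tier", "T?")
--         source_map[f"{source} ({tier})"].append(event["event"][:80])
--
--     lines = ["### Source Map\n"]
--     for source, contributions in sorted(source_map.items()):
--         lines.append(f"**{source}** — {len(contributions)} event(s):")
--         for contrib in contributions: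
--             lines.append(f"  - {contrib}{'...' if len(contrib) == 80 else ''}")
--         lines.append("")
--
--     return "\n".join(lines)
-- ===== SOURCE B (Python) =====
-- def build_source_map(events):
--     """Build a source relationship map showing what each source contributed."""
--     pairs = [(f"{e.get('source', 'Unknown')} ({e.get('tier', 'T?')})", e["event"][:80])
--              for e in events]
--     lines = ["### Source Map\n"]
--     for key in sorted({k for k, _ in pairs}):
--         contribs = [c for k, c in pairs if k == key]
--         lines.append(f"**{key}** — {len(contribs)} event(s):")
--         lines.extend(f"  - {c}{'...' if len(c) == 80 else ''}" for c in contribs)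
--         lines.append("")
--     return "\n".join(lines)
-- ===== Notes on version B (the rewrite author's own statement) =====
-- stated objective: idiomatic
-- what changed: Replaces the defaultdict bucket accumulation + sorted(items) with a single pass computing (key, contribution) pairs, then iterating the sorted distinct keys and selecting each group's contributions by a per-key filter (no dict of lists at all).
import Mathlib
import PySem

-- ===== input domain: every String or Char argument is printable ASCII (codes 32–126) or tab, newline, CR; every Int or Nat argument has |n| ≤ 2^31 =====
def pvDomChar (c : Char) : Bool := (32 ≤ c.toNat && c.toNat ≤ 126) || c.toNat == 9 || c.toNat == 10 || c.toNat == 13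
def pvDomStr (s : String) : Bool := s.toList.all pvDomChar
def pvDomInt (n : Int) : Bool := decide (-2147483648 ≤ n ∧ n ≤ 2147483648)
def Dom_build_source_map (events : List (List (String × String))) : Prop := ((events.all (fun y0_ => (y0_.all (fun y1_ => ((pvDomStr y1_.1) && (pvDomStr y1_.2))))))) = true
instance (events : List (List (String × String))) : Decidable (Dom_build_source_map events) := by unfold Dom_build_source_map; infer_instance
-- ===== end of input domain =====

-- B replaces the defaultdict bucket accumulation + sorted(items) with sorted distinct keys
-- and a per-key filter over precomputed (key, contribution) pairs (idiomatic; not faster).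

-- shared helpers: the f-string expressions both Pythons contain, and dict.get (first-match
-- lookup on the association list, per the type convention)
def pvGet (e : List (String × String)) (k dflt : String) : String :=
  match e.find? (fun p => p.1 == k) with
  | some p => p.2
  | none => dflt

-- f"{source} ({tier})"
def pvKeyOf (e : List (String × String)) : String :=
  PySem.Str.join "" [pvGet e "source" "Unknown", " (", pvGet e "tier" "T?", ")"]

-- event["event"][:80]; the default "" is never used under Pre_ (KeyError inputs are excluded)
def pvContribOf (e : List (String × String)) : String :=
  PySem.Str.slice (pvGet e "event" "") none (some 80)

-- f"**{source}** — {len(contributions)} event(s):"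
def pvHeaderLine (k : String) (n : Int) : String :=
  PySem.Str.join "" ["**", k, "** — ", PySem.Int.toStr n, " event(s):"]

-- f"  - {contrib}{'...' if len(contrib) == 80 else ''}"
def pvContribLine (c : String) : String :=
  PySem.Str.join "" ["  - ", c, if PySem.Str.len c == 80 then "..." else ""]

-- ===== PORT A =====
def build_source_map (events : List (List (String × String))) : String :=
  -- source_map = defaultdict(list); for event in events: source_map[key].append(contrib)
  -- sorted(source_map.items()): dict keys are distinct, so Python's tuple comparison is
  -- exactly comparison of the first components
  PySem.Str.join "\n"
    ((PySem.List.sorted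
        (events.foldl (fun d e => d.modify (pvKeyOf e) [] (fun l => l ++ [pvContribOf e]))
          PySem.Dict.empty).items
        (fun p => p.1) false).foldl
      (fun lines p =>
        (p.2.foldl (fun ls c => ls ++ [pvContribLine c])
          (lines ++ [pvHeaderLine p.1 (p.2.length : Int)])) ++ [""])
      ["### Source Map\n"])

-- ===== PORT B =====
-- the sorted-distinct-keys loop of B over the precomputed (key, contribution) pairs
def pvReport (pairs : List (String × String)) : String :=
  PySem.Str.join "\n"
    ((PySem.List.sorted (PySem.Set.ofList (pairs.map (fun p => p.1))) (fun k => k) false).foldl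
      (fun lines k =>
        lines ++ [pvHeaderLine k (((pairs.filter (fun p => p.1 == k)).map (fun p => p.2)).length : Int)]
          ++ ((pairs.filter (fun p => p.1 == k)).map (fun p => p.2)).map pvContribLine ++ [""])
      ["### Source Map\n"])

def build_source_map_alt (events : List (List (String × String))) : String :=
  pvReport (events.map (fun e => (pvKeyOf e, pvContribOf e)))

-- ===== PRECONDITION & SPEC =====
-- Pre_ excludes exactly the inputs where A raises KeyError: an event without an "event" key
-- (B raises there too).
def Pre_build_source_map (events : List (List (String × String))) : Prop :=
  (events.all (fun e => e.any (fun p => p.1 == "event"))) = true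
instance (events : List (List (String × String))) : Decidable (Pre_build_source_map events) := by
  unfold Pre_build_source_map; infer_instance

def pvWitness_build_source_map : (List (List (String × String))) :=
  [[("source", "Reuters"), ("tier", "T1"), ("event", "a thing happened")],
   [("event", "another thing")]]

def Spec_build_source_map (events : List (List (String × String))) (out : String) : Prop := out = build_source_map_alt events
instance (events : List (List (String × String))) (out : String) : Decidable (Spec_build_source_map events out) := by unfold Spec_build_source_map; infer_instance

-- ===== CLAIM (what is proved, stated in full; the proofs are below) =====
def Claim_equal_build_source_map : Prop := ∀ (events : List (List (String × String))), Dom_build_source_map events → Pre_build_source_map events → Spec_build_source_map events (build_source_map events)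

-- ===== LEMMAS AND PROOFS =====

-- the inner contribution loop of A is B's map, appended
theorem pvFoldlAppendMap (cs ls : List String) :
    cs.foldl (fun ls c => ls ++ [pvContribLine c]) ls = ls ++ cs.map pvContribLine := by
  induction cs generalizing ls with
  | nil => simp
  | cons c cs ih => simp [ih, List.append_assoc]

-- ===== VERDICT (by name: the statement is the Claim_ definition above) =====
theorem build_source_map_spec : Claim_equal_build_source_map := by
  intro events _ _
  unfold Spec_build_source_map build_source_map build_source_map_alt pvReport
  set pairs := events.map (fun e => (pvKeyOf e, pvContribOf e)) with hpairs
  -- A's grouping loop, rephrased over the (key, contribution) pairs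
  have hfold : events.foldl
      (fun d e => d.modify (pvKeyOf e) [] (fun l => l ++ [pvContribOf e])) PySem.Dict.empty
      = pairs.foldl (fun d p => d.modify p.1 [] (fun l => l ++ [p.2])) PySem.Dict.empty := by
    rw [hpairs, List.foldl_map]
  rw [hfold]
  set d := pairs.foldl (fun d p => d.modify p.1 [] (fun l => l ++ [p.2])) PySem.Dict.empty with hd
  have hnd : d.keys.Nodup := by
    rw [hd]
    exact PySem.Dict.nodup_keys_foldl_modify_key pairs (fun p => p.1) []
      (fun _ p l => l ++ [p.2]) PySem.Dict.empty PySem.Dict.nodup_keys_empty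
  have hkeys : d.keys = PySem.Set.ofList (pairs.map (fun p => p.1)) := by
    rw [hd, PySem.Dict.keys_foldl_modify_key pairs (fun p => p.1) []
      (fun _ p l => l ++ [p.2]) PySem.Dict.empty]
    simp [PySem.Dict.keys_empty, PySem.Set.update_nil_left]
  have hgetD : ∀ k, d.getD k [] = (pairs.filter (fun p => p.1 == k)).map (fun p => p.2) := by
    intro k
    rw [hd, PySem.Dict.getD_foldl_modify_append]
    simp [PySem.Dict.getD_empty]
  have hitems : d.items = (PySem.Set.ofList (pairs.map (fun p => p.1))).map
      (fun k => (k, (pairs.filter (fun p => p.1 == k)).map (fun p => p.2))) := by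
    rw [PySem.Dict.items_eq_map_keys d hnd [], hkeys]
    exact List.map_congr_left (fun k _ => by rw [hgetD])
  have hsorted : PySem.List.sorted d.items (fun p => p.1) false
      = (PySem.List.sorted (PySem.Set.ofList (pairs.map (fun p => p.1))) (fun k => k) false).map
          (fun k => (k, (pairs.filter (fun p => p.1 == k)).map (fun p => p.2))) := by
    apply PySem.List.sorted_eq_of_perm_of_pairwise_lt
    · rw [hitems]
      exact (PySem.List.sorted_perm _ _ _).map _
    · rw [List.pairwise_map]
      exact PySem.List.sorted_ofList_pairwise_lt (pairs.map (fun p => p.1))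
  rw [hsorted, List.foldl_map]
  simp only [pvFoldlAppendMap, List.append_assoc]
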